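-- pv_equiv track=rewrite | github.com/John2013/35_diff_service | diff.py | html2list
-- ===== SOURCE A (Python) =====
-- import string
--
-- def html2list(text, b=0):
--     mode = 'char'
--     cur = ''
--     out = []
--     for char in text:
--         if mode == 'tag':
--             if char == '>':
--                 if b:
--                     cur += ']'
--                 else:
--                     cur += char
--                 out.append(cur)
--                 cur = ''
--                 mode = 'char'
--             else:
--                 cur += char
--         elif mode == 'char':
--             if char == '<':
--                 out.append(cur)
--                 if b:
--                     cur = '['
--                 else:
--                     cur = char
--                 mode = 'tag'
--             elif char in string.whitespace:
--                 out.append(cur + char)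
--                 cur = ''
--             else:
--                 cur += char
--     out.append(cur)
--     return list(filter(lambda x: x is not '', out))
-- ===== SOURCE B (Python) =====
-- import string
--
-- def html2list(text, b=0):
--     # slice-based tokenizer: jump to the closing '>' of a tag with str.find,
--     # scan a whole word (plus one trailing whitespace char) at once; brackets
--     # applied as a post-step on each tag token.
--     out = []
--     i = 0
--     n = len(text)
--     while i < n:
--         if text[i] == '<':
--             j = text.find('>', i)
--             if j == -1:
--                 tag, i = text[i:], n
--             else:
--                 tag, i = text[i:j + 1], j + 1
--             if b:
--                 tag = '[' + tag[1:-1] + ']' if tag.endswith('>') else '[' + tag[1:]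
--             out.append(tag)
--         else:
--             j = i
--             while j < n and text[j] != '<' and text[j] not in string.whitespace:
--                 j += 1
--             if j < n and text[j] in string.whitespace:
--                 out.append(text[i:j + 1])
--                 i = j + 1
--             else:
--                 if j > i:
--                     out.append(text[i:j])
--                 i = j
--     return out
-- ===== Notes on version B (the rewrite author's own statement) =====
-- stated objective: alternative
-- what changed: Replaces the per-character mode/cur state machine with a slice-based scanner that jumps straight to a tag's closing '>' (str.find) and takes whole words plus one trailing whitespace char at once, applying the '['/']' bracket substitution as a post-step on each tag token instead of inline, so no mode flag, character accumulator or final empty-token filter is needed.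
import Mathlib
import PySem

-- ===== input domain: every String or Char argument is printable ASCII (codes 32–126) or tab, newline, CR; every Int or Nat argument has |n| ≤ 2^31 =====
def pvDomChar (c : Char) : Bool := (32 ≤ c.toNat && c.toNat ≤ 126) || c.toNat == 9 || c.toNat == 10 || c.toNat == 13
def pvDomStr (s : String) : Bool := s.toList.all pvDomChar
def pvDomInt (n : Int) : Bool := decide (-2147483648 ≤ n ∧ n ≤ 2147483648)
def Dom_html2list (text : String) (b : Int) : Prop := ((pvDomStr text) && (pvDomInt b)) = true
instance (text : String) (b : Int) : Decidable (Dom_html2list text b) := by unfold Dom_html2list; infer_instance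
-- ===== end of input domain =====

-- B replaces A's per-character mode/cur state machine by a slice-based scan that jumps
-- to the closing '>' of a tag (str.find) and takes whole words at once, applying the
-- '['/']' substitution as a post-step on each tag token (objective: alternative).

-- string.whitespace = ' \t\n\x0b\x0c\r' (shared char class, exact)
def pyWS (c : Char) : Bool := c == ' ' || c == '\t' || c == '\n' || c == '\r' || c == Char.ofNat 11 || c == Char.ofNat 12

-- ===== PORT A =====
-- strings are handled as List Char (String.toList / String.mk), exact on this domain;
-- Python's `filter(lambda x: x is not '')` removes exactly the empty strings here
-- (every empty token appended is the interned literal ''), ported as `≠ []`.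
def stepA (b : Int) (st : Bool × List Char × List (List Char)) (c : Char) :
    Bool × List Char × List (List Char) :=
  match st with
  | (mode, cur, out) =>
    if mode then  -- mode == 'tag'
      if c = '>' then
        (false, [], out ++ [cur ++ [if b ≠ 0 then ']' else c]])
      else (true, cur ++ [c], out)
    else          -- mode == 'char'
      if c = '<' then (true, [if b ≠ 0 then '[' else c], out ++ [cur])
      else if pyWS c then (false, [], out ++ [cur ++ [c]])
      else (false, cur ++ [c], out)

def html2list (text : String) (b : Int) : List String :=
  ((((text.toList.foldl (stepA b) (false, [], [])).2.2
      ++ [(text.toList.foldl (stepA b) (false, [], [])).2.1]).filter (fun x => x ≠ []))).map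
    (fun l => String.mk l)

-- ===== PORT B =====
-- `tag = '[' + tag[1:-1] + ']' if tag.endswith('>') else '[' + tag[1:]` (exact)
def tagPost (b : Int) (tag : List Char) : List Char :=
  if b ≠ 0 then
    if tag.getLast? = some '>' then '[' :: ((tag.drop 1).dropLast ++ [']'])
    else '[' :: tag.drop 1
  else tag

-- a character the inner word-scanning while loop of Source B steps over
def wordChar (c : Char) : Bool := !(c == '<') && !(pyWS c)

-- the while loop of Source B over the remaining suffix of the text, by hand (no PySem
-- regex/find primitive): `text.find('>', i)` + slicing = List.span on the suffix, exact.
-- When text[i] is whitespace the word scan takes zero characters and emits [text[i]];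
-- that case is split off so each recursive call is on a shorter list.
def goB (b : Int) : List Char → List (List Char)
  | [] => []
  | c :: rest =>
    if c = '<' then
      match h : rest.span (fun x => !(x == '>')) with
      | (p1, []) => [tagPost b ('<' :: p1)]
      | (p1, g :: rest') => tagPost b ('<' :: (p1 ++ ['>'])) :: goB b rest'
    else if pyWS c then [c] :: goB b rest
    else
      match h : rest.span wordChar with
      | (q1, []) => [c :: q1]
      | (q1, w :: rest') =>
        if pyWS w then (c :: (q1 ++ [w])) :: goB b rest'
        else (c :: q1) :: goB b (w :: rest')
  termination_by l => l.length
  decreasing_by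
  · have h2 : rest.dropWhile (fun x => !(x == '>')) = g :: rest' := by
      simpa [List.span_eq_takeWhile_dropWhile] using congrArg Prod.snd h
    have := List.length_dropWhile_le (fun x => !(x == '>')) rest
    simp [h2] at this; simp; omega
  · simp
  · have h2 : rest.dropWhile wordChar = w :: rest' := by
      simpa [List.span_eq_takeWhile_dropWhile] using congrArg Prod.snd h
    have := List.length_dropWhile_le wordChar rest
    simp [h2] at this; simp; omega
  · have h2 : rest.dropWhile wordChar = w :: rest' := by
      simpa [List.span_eq_takeWhile_dropWhile] using congrArg Prod.snd h
    have := List.length_dropWhile_le wordChar rest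
    simp [h2] at this; simp; omega

def html2list_alt (text : String) (b : Int) : List String :=
  (goB b text.toList).map (fun l => String.mk l)

-- ===== PRECONDITION & SPEC =====
def Spec_html2list (text : String) (b : Int) (out : List String) : Prop := out = html2list_alt text b
instance (text : String) (b : Int) (out : List String) : Decidable (Spec_html2list text b out) := by unfold Spec_html2list; infer_instance

-- ===== CLAIM (what is proved, stated in full; the proofs are below) =====
def Claim_equal_html2list : Prop := ∀ (text : String) (b : Int), Dom_html2list text b → Spec_html2list text b (html2list text b)

-- ===== LEMMAS AND PROOFS =====

-- A's state machine as a structural recursion over the remaining characters: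
-- FT b mode cur l = the (already-filtered) tokens A still emits from state (mode, cur).
def FT (b : Int) : Bool → List Char → List Char → List (List Char)
  | _, cur, [] => if cur = [] then [] else [cur]
  | true, cur, c :: l =>
      if c = '>' then (cur ++ [if b ≠ 0 then ']' else c]) :: FT b false [] l
      else FT b true (cur ++ [c]) l
  | false, cur, c :: l =>
      if c = '<' then (if cur = [] then [] else [cur]) ++ FT b true [if b ≠ 0 then '[' else c] l
      else if pyWS c then (cur ++ [c]) :: FT b false [] l
      else FT b false (cur ++ [c]) l

theorem foldA_FT (b : Int) (l : List Char) : ∀ (mode : Bool) (cur : List Char) (out : List (List Char)),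
    (((l.foldl (stepA b) (mode, cur, out)).2.2 ++ [(l.foldl (stepA b) (mode, cur, out)).2.1]).filter (fun x => x ≠ []))
      = out.filter (fun x => x ≠ []) ++ FT b mode cur l := by
  induction l with
  | nil =>
    intro mode cur out
    cases mode <;> simp [FT, List.filter_append] <;> split <;> simp_all
  | cons c l ih =>
    intro mode cur out
    cases mode with
    | true =>
      by_cases hc : c = '>' <;>
        simp only [List.foldl_cons, stepA, hc, if_true, if_false, FT, ih, List.filter_append] <;>
        simp [FT, hc, List.filter_append]
    | false =>
      by_cases hc : c = '<'
      · simp only [List.foldl_cons, stepA, hc, if_true, FT, ih, List.filter_append]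
        simp [hc]; split <;> simp_all
      · by_cases hw : pyWS c <;>
          simp only [List.foldl_cons, stepA, hc, hw, if_true, if_false, FT, ih, List.filter_append] <;>
          simp [FT, hc, hw, List.filter_append]

theorem FT_tag (b : Int) : ∀ (l acc : List Char),
    FT b true ((if b ≠ 0 then '[' else '<') :: acc) l =
      (if (l.dropWhile (fun x => !(x == '>'))) = [] then
        [(if b ≠ 0 then '[' else '<') :: (acc ++ l.takeWhile (fun x => !(x == '>')))]
      else ((if b ≠ 0 then '[' else '<') :: (acc ++ l.takeWhile (fun x => !(x == '>')) ++ [if b ≠ 0 then ']' else '>']))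
             :: FT b false [] ((l.dropWhile (fun x => !(x == '>'))).tail)) := by
  intro l
  induction l with
  | nil => intro acc; simp [FT]
  | cons c l ih =>
    intro acc
    by_cases hc : c = '>'
    · simp [FT, hc]
    · have := ih (acc ++ [c])
      simp [FT, hc, List.dropWhile_cons, List.takeWhile_cons] at this ⊢
      simpa using this

theorem dropWhile_head_false (p : Char → Bool) : ∀ (l : List Char) (w : Char) (t : List Char),
    l.dropWhile p = w :: t → p w = false := by
  intro l
  induction l with
  | nil => intro w t h; simp at h
  | cons c l ih =>
    intro w t h
    by_cases hp : p c
    · exact ih w t (by simpa [List.dropWhile_cons, hp] using h)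
    · simp [List.dropWhile_cons, hp] at h
      rw [← h.1]; simpa using hp

theorem FT_word (b : Int) : ∀ (l acc : List Char), acc ≠ [] →
    FT b false acc l =
      (if (l.dropWhile wordChar) = [] then [acc ++ l.takeWhile wordChar]
       else if pyWS (l.dropWhile wordChar).head! then
         (acc ++ l.takeWhile wordChar ++ [(l.dropWhile wordChar).head!]) :: FT b false [] ((l.dropWhile wordChar).tail)
       else (acc ++ l.takeWhile wordChar) :: FT b true [if b ≠ 0 then '[' else '<'] ((l.dropWhile wordChar).tail)) := by
  intro l
  induction l with
  | nil => intro acc ha; simp [FT, ha]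
  | cons c l ih =>
    intro acc ha
    by_cases hc : c = '<'
    · have hwc : wordChar c = false := by simp [wordChar, hc]
      have hpw : pyWS c = false := by rw [hc]; decide
      simp [FT, hc, List.dropWhile_cons, List.takeWhile_cons, hwc, ha, hc ▸ hwc, hc ▸ hpw]
    · by_cases hw : pyWS c
      · have hwc : wordChar c = false := by simp [wordChar, hw]
        simp [FT, hc, hw, List.dropWhile_cons, List.takeWhile_cons, hwc, ha]
      · have hwc : wordChar c = true := by simp [wordChar, hc, hw]
        have := ih (acc ++ [c]) (by simp)
        simp [FT, hc, hw, List.dropWhile_cons, List.takeWhile_cons, hwc] at this ⊢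
        simpa using this

theorem takeWhile_no_gt (l : List Char) : ('<' :: l.takeWhile (fun x => !(x == '>'))).getLast? ≠ some '>' := by
  intro h
  have hmem : '>' ∈ '<' :: l.takeWhile (fun x => !(x == '>')) := by
    obtain ⟨ys, hys⟩ := List.getLast?_eq_some_iff.mp h
    simp [hys]
  rcases List.mem_cons.mp hmem with h1 | h2
  · simp at h1
  · have := List.mem_takeWhile_imp h2
    simp at this

theorem tagPost_open (b : Int) (l : List Char) :
    tagPost b ('<' :: l.takeWhile (fun x => !(x == '>'))) =
      (if b ≠ 0 then '[' else '<') :: l.takeWhile (fun x => !(x == '>')) := by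
  by_cases hb : b = 0
  · simp [tagPost, hb]
  · simp [tagPost, hb, takeWhile_no_gt l]

theorem tagPost_closed (b : Int) (p1 : List Char) :
    tagPost b ('<' :: (p1 ++ ['>'])) =
      (if b ≠ 0 then '[' else '<') :: (p1 ++ [if b ≠ 0 then ']' else '>']) := by
  by_cases hb : b = 0
  · simp [tagPost, hb]
  · have hlast : ('<' :: (p1 ++ ['>'])).getLast? = some '>' := by
      rw [← List.cons_append]; exact List.getLast?_concat
    simp [tagPost, hb, hlast, List.dropLast_concat]

theorem FT_goB (b : Int) : ∀ (n : Nat) (l : List Char), l.length ≤ n → FT b false [] l = goB b l := by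
  intro n
  induction n with
  | zero => intro l hl; rw [List.length_eq_zero_iff.mp (Nat.le_zero.mp hl)]; simp [FT, goB]
  | succ n ih =>
    intro l hl
    match l with
    | [] => simp [FT, goB]
    | c :: rest =>
      simp only [List.length_cons, Nat.succ_le_succ_iff] at hl
      rw [goB]
      by_cases hc : c = '<'
      · -- tag case
        have hft : FT b false [] (c :: rest) = FT b true [if b ≠ 0 then '[' else '<'] rest := by
          simp [FT, hc]
        have htag := FT_tag b rest []
        simp only [List.nil_append] at htag
        subst hc
        simp only [reduceIte]
        split
        · rename_i p1 h
          rw [hft, htag]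
          have hp1 : p1 = rest.takeWhile (fun x => !(x == '>')) := by
            simpa [List.span_eq_takeWhile_dropWhile] using (congrArg Prod.fst h).symm
          have hdw : rest.dropWhile (fun x => !(x == '>')) = [] := by
            simpa [List.span_eq_takeWhile_dropWhile] using congrArg Prod.snd h
          simp [hdw, hp1, tagPost_open]
        · rename_i p1 g rest' h
          rw [hft, htag]
          have hp1 : p1 = rest.takeWhile (fun x => !(x == '>')) := by
            simpa [List.span_eq_takeWhile_dropWhile] using (congrArg Prod.fst h).symm
          have hdw : rest.dropWhile (fun x => !(x == '>')) = g :: rest' := by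
            simpa [List.span_eq_takeWhile_dropWhile] using congrArg Prod.snd h
          have hlen : rest'.length ≤ n := by
            have := List.length_dropWhile_le (fun x => !(x == '>')) rest
            rw [hdw] at this; simp at this; omega
          simp [hdw, hp1, tagPost_closed, ih rest' hlen]
      · by_cases hw : pyWS c
        · -- lone whitespace char
          have hft : FT b false [] (c :: rest) = ([c]) :: FT b false [] rest := by
            simp [FT, hc, hw]
          rw [hft, ih rest hl]
          simp [hc, hw]
        · -- word case
          have hwc : wordChar c = true := by simp [wordChar, hc, hw]
          have hft : FT b false [] (c :: rest) = FT b false [c] rest := by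
            simp [FT, hc, hw]
          rw [if_neg hc, if_neg hw]
          split
          · rename_i q1 h
            rw [hft, FT_word b rest [c] (by simp)]
            have hq1 : q1 = rest.takeWhile wordChar := by
              simpa [List.span_eq_takeWhile_dropWhile] using (congrArg Prod.fst h).symm
            have hdw : rest.dropWhile wordChar = [] := by
              simpa [List.span_eq_takeWhile_dropWhile] using congrArg Prod.snd h
            simp [hdw, hq1]
          · rename_i q1 w rest' h
            rw [hft, FT_word b rest [c] (by simp)]
            have hq1 : q1 = rest.takeWhile wordChar := by
              simpa [List.span_eq_takeWhile_dropWhile] using (congrArg Prod.fst h).symm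
            have hdw : rest.dropWhile wordChar = w :: rest' := by
              simpa [List.span_eq_takeWhile_dropWhile] using congrArg Prod.snd h
            have hwdrop : wordChar w = false := dropWhile_head_false wordChar rest w rest' hdw
            have hlen' : rest'.length ≤ n := by
              have := List.length_dropWhile_le wordChar rest
              rw [hdw] at this; simp at this; omega
            by_cases hww : pyWS w
            · simp [hdw, hq1, hww, ih rest' hlen']
            · -- w must be '<'
              have hwlt : w = '<' := by
                simp [wordChar, hww] at hwdrop; exact hwdrop
              have hlen2 : (w :: rest').length ≤ n := by
                have := List.length_dropWhile_le wordChar rest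
                rw [hdw] at this; simp at this ⊢; omega
              have hgo : goB b (w :: rest') = FT b true [if b ≠ 0 then '[' else '<'] rest' := by
                rw [← ih (w :: rest') hlen2]
                simp [FT, hwlt]
              simp [hdw, hq1, hww, hgo]

theorem html2list_eq (text : String) (b : Int) : html2list text b = html2list_alt text b := by
  unfold html2list html2list_alt
  rw [foldA_FT b text.toList false [] []]
  simp only [List.filter_nil, List.nil_append]
  rw [FT_goB b text.toList.length text.toList le_rfl]

-- ===== VERDICT (by name: the statement is the Claim_ definition above) =====
theorem html2list_spec : Claim_equal_html2list := by
  intro text b _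
  unfold Spec_html2list
  exact html2list_eq text b
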